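-- pv_equiv track=rewrite | github.com/fullscreen-triangle/nebuchadnezzar | babylon/src/bmd_engine/therapeutic_predictor.py | _assess_interaction_risks
-- ===== SOURCE A (Python) =====
-- from typing import Dict, List, Tuple, Optional, Any, Union
--
-- def _assess_interaction_risks(drug_combination: List[str],
--                             drug_interactions: Dict[str, str]) -> List[str]:
--     """Assess risks from drug interactions."""
--
--     risks = []
--
--     # High-risk interactions
--     high_risk_pairs = [pair for pair, risk in drug_interactions.items() if risk == 'high']
--     for pair in high_risk_pairs:
--         risks.append(f"High interaction risk: {pair.replace('_', ' + ')}")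
--
--     # Moderate risk interactions
--     moderate_risk_pairs = [pair for pair, risk in drug_interactions.items() if risk == 'moderate']
--     for pair in moderate_risk_pairs:
--         risks.append(f"Monitor for interactions: {pair.replace('_', ' + ')}")
--
--     # Additive side effects
--     if len(drug_combination) > 2:
--         risks.append("Potential additive side effects from multiple drugs")
--
--     return risks
-- ===== SOURCE B (Python) =====
-- def _assess_interaction_risks(drug_combination, drug_interactions):
--     """Sort-based: keep the relevant interactions, stable-sort them by severity
--     rank (high before moderate), then render each into its message."""
--     relevant = [kv for kv in drug_interactions.items() if kv[1] in ('high', 'moderate')]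
--     relevant.sort(key=lambda kv: 0 if kv[1] == 'high' else 1)
--     risks = [("High interaction risk: " if risk == 'high' else "Monitor for interactions: ")
--              + pair.replace('_', ' + ')
--              for pair, risk in relevant]
--     if len(drug_combination) > 2:
--         risks.append("Potential additive side effects from multiple drugs")
--     return risks
-- ===== Notes on version B (the rewrite author's own statement) =====
-- stated objective: alternative
-- what changed: Replaces A's two staged filter-comprehensions each followed by its own append loop with a filter of the relevant entries, a stable sort keyed by severity rank (high=0, moderate=1), and one rendering map; equivalence rests on sort stability preserving dict order within each severity.
import Mathlib
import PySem

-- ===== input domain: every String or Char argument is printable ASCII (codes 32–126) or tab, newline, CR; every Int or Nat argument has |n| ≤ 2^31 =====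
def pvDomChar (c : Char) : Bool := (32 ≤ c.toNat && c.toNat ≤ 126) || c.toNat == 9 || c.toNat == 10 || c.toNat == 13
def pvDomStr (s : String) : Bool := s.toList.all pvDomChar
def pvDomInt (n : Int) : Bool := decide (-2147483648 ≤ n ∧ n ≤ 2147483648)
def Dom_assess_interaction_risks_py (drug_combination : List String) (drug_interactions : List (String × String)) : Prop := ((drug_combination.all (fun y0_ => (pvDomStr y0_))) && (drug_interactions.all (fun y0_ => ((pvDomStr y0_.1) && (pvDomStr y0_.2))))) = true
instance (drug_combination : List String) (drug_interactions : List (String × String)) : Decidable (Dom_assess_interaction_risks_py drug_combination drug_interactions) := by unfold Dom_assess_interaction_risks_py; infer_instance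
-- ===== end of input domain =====

-- B replaces A's two staged filter-then-append passes by filter + stable sort on a
-- severity rank + one rendering map (alternative algorithm, same observable result).

-- ===== PORT A =====
def assess_interaction_risks_py (drug_combination : List String) (drug_interactions : List (String × String)) : List String :=
  let risks : List String := []
  -- high_risk_pairs = [pair for pair, risk in drug_interactions.items() if risk == 'high']
  let high_risk_pairs := (drug_interactions.filter (fun kv => kv.2 == "high")).map (·.1)
  let risks := high_risk_pairs.foldl
    (fun r pair => r ++ ["High interaction risk: " ++ PySem.Str.replace pair "_" " + "]) risks
  -- moderate_risk_pairs = [pair for pair, risk in drug_interactions.items() if risk == 'moderate']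
  let moderate_risk_pairs := (drug_interactions.filter (fun kv => kv.2 == "moderate")).map (·.1)
  let risks := moderate_risk_pairs.foldl
    (fun r pair => r ++ ["Monitor for interactions: " ++ PySem.Str.replace pair "_" " + "]) risks
  if drug_combination.length > 2 then
    risks ++ ["Potential additive side effects from multiple drugs"]
  else risks

-- ===== PORT B =====
-- key=lambda kv: 0 if kv[1] == 'high' else 1
def sevRank (kv : String × String) : Int := if kv.2 == "high" then 0 else 1

-- one item of the rendering comprehension
def riskMsg (kv : String × String) : String :=
  (if kv.2 == "high" then "High interaction risk: " else "Monitor for interactions: ")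
    ++ PySem.Str.replace kv.1 "_" " + "

def assess_interaction_risks_py_alt (drug_combination : List String) (drug_interactions : List (String × String)) : List String :=
  -- relevant = [kv for kv in drug_interactions.items() if kv[1] in ('high', 'moderate')]
  let relevant := drug_interactions.filter (fun kv => kv.2 == "high" || kv.2 == "moderate")
  -- relevant.sort(key=…)  (stable sort)
  let relevant := PySem.List.sorted relevant sevRank
  let risks := relevant.map riskMsg
  if drug_combination.length > 2 then
    risks ++ ["Potential additive side effects from multiple drugs"]
  else risks

-- ===== PRECONDITION & SPEC =====
def Spec_assess_interaction_risks_py (drug_combination : List String) (drug_interactions : List (String × String)) (out : List String) : Prop := out = assess_interaction_risks_py_alt drug_combination drug_interactions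
instance (drug_combination : List String) (drug_interactions : List (String × String)) (out : List String) : Decidable (Spec_assess_interaction_risks_py drug_combination drug_interactions out) := by unfold Spec_assess_interaction_risks_py; infer_instance

-- ===== CLAIM (what is proved, stated in full; the proofs are below) =====
def Claim_equal_assess_interaction_risks_py : Prop := ∀ (drug_combination : List String) (drug_interactions : List (String × String)), Dom_assess_interaction_risks_py drug_combination drug_interactions → Spec_assess_interaction_risks_py drug_combination drug_interactions (assess_interaction_risks_py drug_combination drug_interactions)

-- ===== LEMMAS AND PROOFS =====

-- inserting a 'high' item lands right after the existing 'high' prefix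
theorem insertBy_high (x : String × String) (hx : x.2 = "high")
    (H M : List (String × String)) (hH : ∀ y ∈ H, y.2 = "high") (hM : ∀ y ∈ M, y.2 ≠ "high") :
    PySem.List.insertBy (fun a b => decide (sevRank a < sevRank b)) x (H ++ M)
      = H ++ x :: M := by
  induction H with
  | nil =>
    cases M with
    | nil => simp [PySem.List.insertBy]
    | cons m t =>
      have hm : m.2 ≠ "high" := hM m (by simp)
      simp [PySem.List.insertBy, sevRank, hx, hm]
  | cons h t ih =>
    have hh : h.2 = "high" := hH h (by simp)
    have hrec := ih (fun y hy => hH y (by simp [hy]))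
    have hb : (decide (sevRank x < sevRank h)) = false := by simp [sevRank, hx, hh]
    simp [PySem.List.insertBy, hb, hrec]

-- inserting a non-'high' item always lands at the end
theorem insertBy_low (x : String × String) (hx : x.2 ≠ "high") (L : List (String × String)) :
    PySem.List.insertBy (fun a b => decide (sevRank a < sevRank b)) x L = L ++ [x] := by
  apply PySem.List.insertBy_of_forall_not_before
  intro y _
  have h1 : sevRank x = 1 := by simp [sevRank, hx]
  have h2 : sevRank y ≤ 1 := by unfold sevRank; split <;> omega
  simp only [decide_eq_false_iff_not, not_lt, h1]
  exact h2

-- the insertion-sort fold keeps the 'high' block before the rest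
theorem foldl_insertBy_split (ys : List (String × String)) :
    ∀ (H M : List (String × String)), (∀ y ∈ H, y.2 = "high") → (∀ y ∈ M, y.2 ≠ "high") →
    ys.foldl (fun acc x => PySem.List.insertBy (fun a b => decide (sevRank a < sevRank b)) x acc) (H ++ M)
      = (H ++ ys.filter (fun kv => kv.2 == "high")) ++ (M ++ ys.filter (fun kv => !(kv.2 == "high"))) := by
  induction ys with
  | nil => intro H M _ _; simp
  | cons x tl ih =>
    intro H M hH hM
    by_cases hx : x.2 = "high"
    · rw [List.foldl_cons, insertBy_high x hx H M hH hM,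
        show H ++ x :: M = (H ++ [x]) ++ M by simp,
        ih (H ++ [x]) M (by intro y hy; rcases List.mem_append.1 hy with h | h
                            · exact hH y h
                            · simp at h; simp [h, hx]) hM]
      simp [hx]
    · rw [List.foldl_cons, insertBy_low x hx,
        show (H ++ M) ++ [x] = H ++ (M ++ [x]) by simp,
        ih H (M ++ [x]) hH (by intro y hy; rcases List.mem_append.1 hy with h | h
                               · exact hM y h
                               · simp at h; simp [h, hx])]
      simp [hx]

-- the stable sort of the relevant items is exactly: high items (in order) ++ moderate items (in order)
theorem sorted_relevant (di : List (String × String)) :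
    PySem.List.sorted (di.filter (fun kv => kv.2 == "high" || kv.2 == "moderate")) sevRank
      = di.filter (fun kv => kv.2 == "high") ++ di.filter (fun kv => kv.2 == "moderate") := by
  rw [PySem.List.sorted_eq_foldl_insertBy]
  have h := foldl_insertBy_split (di.filter (fun kv => kv.2 == "high" || kv.2 == "moderate"))
      [] [] (by simp) (by simp)
  simp only [List.nil_append] at h
  rw [h, List.filter_filter, List.filter_filter]
  congr 1
  · apply List.filter_congr; intro kv _
    by_cases h1 : kv.2 = "high" <;> simp [h1]
  · apply List.filter_congr; intro kv _
    by_cases h1 : kv.2 = "high"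
    · simp [h1]
    · by_cases h2 : kv.2 = "moderate"
      · rw [h2]; decide
      · rw [show (kv.2 == "high") = false from beq_eq_false_iff_ne.2 h1,
             show (kv.2 == "moderate") = false from beq_eq_false_iff_ne.2 h2]
        decide

-- ===== VERDICT (by name: the statement is the Claim_ definition above) =====
theorem assess_interaction_risks_py_spec : Claim_equal_assess_interaction_risks_py := by
  intro dc di _
  unfold Spec_assess_interaction_risks_py assess_interaction_risks_py assess_interaction_risks_py_alt
  simp only [sorted_relevant, PySem.List.foldl_append_singleton_eq_map, List.nil_append,
    List.map_append, List.map_map]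
  have hhigh : (di.filter (fun kv => kv.2 == "high")).map riskMsg
      = (di.filter (fun kv => kv.2 == "high")).map
          ((fun pair => "High interaction risk: " ++ PySem.Str.replace pair "_" " + ") ∘ (·.1)) := by
    apply List.map_congr_left
    intro kv hkv
    have : kv.2 = "high" := eq_of_beq (List.mem_filter.1 hkv).2
    simp [riskMsg, Function.comp, this]
  have hmod : (di.filter (fun kv => kv.2 == "moderate")).map riskMsg
      = (di.filter (fun kv => kv.2 == "moderate")).map
          ((fun pair => "Monitor for interactions: " ++ PySem.Str.replace pair "_" " + ") ∘ (·.1)) := by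
    apply List.map_congr_left
    intro kv hkv
    have h2 : kv.2 = "moderate" := eq_of_beq (List.mem_filter.1 hkv).2
    have h1 : kv.2 ≠ "high" := by simp [h2]
    simp [riskMsg, Function.comp, h1]
  rw [hhigh, hmod]
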